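-- pv_equiv track=rewrite | github.com/Michael14567/Signal | mian.py | build_trellis_by_generator_matrix
-- ===== SOURCE A (Python) =====
-- from itertools import product
--
-- def gf2_vector_matrix_mul(vector, matrix):
--     """
--     Умножение вектора-строки на матрицу над GF(2).
--     """
--     result = []
--
--     for column in range(len(matrix[0])):
--         value = 0
--
--         for row in range(len(vector)):
--             value ^= vector[row] & matrix[row][column]
--
--         result.append(value)
--
--     return tuple(result)
--
-- def generate_linear_code(generator_matrix):
--     k = len(generator_matrix)
--     messages = list(product([0, 1], repeat=k))
--     codewords = [
--         gf2_vector_matrix_mul(message, generator_matrix)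
--         for message in messages
--     ]
--
--     return messages, sorted(set(codewords))
--
-- def row_span(row):
--     nonzero = [
--         index
--         for index, value in enumerate(row)
--         if value == 1
--     ]
--
--     return min(nonzero), max(nonzero)
--
-- def active_rows_after_position(generator_matrix, level):
--     active = []
--
--     for index, row in enumerate(generator_matrix):
--         start, end = row_span(row)
--
--         if start < level <= end:
--             active.append(index)
--
--     return active
--
-- def build_trellis_by_generator_matrix(generator_matrix):
--     messages, codewords = generate_linear_code(generator_matrix)
--     n = len(generator_matrix[0])
--
--     states_by_level = []
--     state_maps = []
--
--     for level in range(n + 1):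
--         active = active_rows_after_position(generator_matrix, level)
--
--         states = sorted(set(
--             tuple(message[row] for row in active)
--             for message in messages
--         ))
--
--         state_map = {
--             state: f"S{level}_{index}"
--             for index, state in enumerate(states)
--         }
--
--         states_by_level.append([
--             f"{state_map[state]}={state}"
--             for state in states
--         ])
--         state_maps.append((active, state_map))
--
--     edges = []
--
--     for level in range(n):
--         edge_set = set()
--
--         active_source, source_map = state_maps[level]
--         active_target, target_map = state_maps[level + 1]
--
--         for message, codeword in zip(messages, codewords):
--             source_state = tuple(message[row] for row in active_source)
--             target_state = tuple(message[row] for row in active_target)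
--
--             source = source_map[source_state]
--             target = target_map[target_state]
--             label = codeword[level]
--
--             edge_set.add((source, target, label))
--
--         edges.append(sorted(edge_set))
--
--     return states_by_level, edges
-- ===== SOURCE B (Python) =====
-- from itertools import product
--
-- def _row_span(row):
--     nonzero = [i for i, v in enumerate(row) if v == 1]
--     return min(nonzero), max(nonzero)
--
-- def _codeword(message, matrix, n):
--     acc = [0] * n
--     for bit, row in zip(message, matrix):
--         acc = [a ^ (bit & row[col]) for col, a in enumerate(acc)]
--     return tuple(acc)
--
-- def _name(level, message, active):
--     idx = 0
--     for row in active: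
--         idx = 2 * idx + message[row]
--     return f"S{level}_{idx}"
--
-- def build_trellis_by_generator_matrix(generator_matrix):
--     k = len(generator_matrix)
--     n = len(generator_matrix[0])
--
--     spans = [_row_span(row) for row in generator_matrix]
--     actives = [
--         [i for i, (start, end) in enumerate(spans) if start < level <= end]
--         for level in range(n + 1)
--     ]
--
--     # States at each level are exactly all 0/1 tuples over the active rows,
--     # already in sorted order: name them by their position directly.
--     states_by_level = [
--         [f"S{level}_{index}={state}"
--          for index, state in enumerate(product([0, 1], repeat=len(actives[level])))]
--         for level in range(n + 1)
--     ]
--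
--     messages = list(product([0, 1], repeat=k))
--     codewords = sorted(set(_codeword(m, generator_matrix, n) for m in messages))
--
--     edge_sets = [set() for _ in range(n)]
--     for message, codeword in zip(messages, codewords):
--         for level in range(n):
--             edge_sets[level].add((_name(level, message, actives[level]),
--                                   _name(level + 1, message, actives[level + 1]),
--                                   codeword[level]))
--
--     return states_by_level, [sorted(s) for s in edge_sets]
-- ===== Notes on version B (the rewrite author's own statement) =====
-- stated objective: alternative
-- what changed: B builds each level's state list directly as the product of 0/1 bits over the active rows (provably equal to A's sorted set of 2^k message projections), names states by an arithmetically computed binary index instead of A's per-level enumeration dict, computes codewords row-major by XOR accumulation instead of A's column-major scan, and collects edges in one pass over the (message, codeword) pairs updating all n per-level sets instead of A's per-level rescans.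
import Mathlib
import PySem

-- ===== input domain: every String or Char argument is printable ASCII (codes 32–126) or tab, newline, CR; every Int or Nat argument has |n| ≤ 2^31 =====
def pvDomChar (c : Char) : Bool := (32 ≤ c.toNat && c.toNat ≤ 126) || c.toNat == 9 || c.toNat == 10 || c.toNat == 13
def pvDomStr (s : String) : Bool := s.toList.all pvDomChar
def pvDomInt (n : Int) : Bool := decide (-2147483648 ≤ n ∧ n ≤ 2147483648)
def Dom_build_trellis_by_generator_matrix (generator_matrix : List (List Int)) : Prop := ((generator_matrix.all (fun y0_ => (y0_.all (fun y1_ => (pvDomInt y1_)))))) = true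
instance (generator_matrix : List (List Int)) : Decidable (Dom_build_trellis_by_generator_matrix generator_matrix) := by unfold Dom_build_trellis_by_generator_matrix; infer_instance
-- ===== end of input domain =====

-- B replaces the sorted-set-of-projections state construction by direct product-of-bits enumeration
-- with arithmetically computed state indices (no per-level dict), and swaps the edge loops into one
-- pass over the (message, codeword) pairs; same return value on every input A accepts.

-- ===== PORT A =====

-- str(t) for a Python tuple of ints: "()", "(x,)", "(x, y, …)" (exact for int entries)
def pvTupleRepr (t : List Int) : String :=
  match t with
  | [] => "()"
  | [x] => "(" ++ PySem.Int.toStr x ++ ",)"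
  | x :: rest => "(" ++ PySem.Int.toStr x ++ rest.foldl (fun s y => s ++ ", " ++ PySem.Int.toStr y) "" ++ ")"

-- f"S{level}_{idx}"
def pvName (level : Nat) (idx : Int) : String :=
  "S" ++ PySem.Int.toStr (level : Int) ++ "_" ++ PySem.Int.toStr idx

-- Python's '<' on (str, str, int) triples: lexicographic, strings by code point (exact on ASCII)
def pvEdgeLt (a b : String × String × Int) : Bool :=
  decide (a.1 < b.1) || (a.1 == b.1 && (decide (a.2.1 < b.2.1) || (a.2.1 == b.2.1 && decide (a.2.2 < b.2.2))))

-- sorted(...) on a list of such triples, as the insertion-sort form of Python's sorted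
-- (PySem.List.sorted_eq_foldl_insertBy); exact because pvEdgeLt is Python's strict tuple '<'
def pvEdgeSort (l : List (String × String × Int)) : List (String × String × Int) :=
  l.foldl (fun acc x => PySem.List.insertBy pvEdgeLt x acc) []

-- itertools.product([0, 1], repeat=k), in CPython's order
def prod01 : Nat → List (List Int)
  | 0 => [[]]
  | Nat.succ k => (prod01 k).map (fun t => 0 :: t) ++ (prod01 k).map (fun t => 1 :: t)

def gf2_vector_matrix_mul (vector : List Int) (matrix : List (List Int)) : List Int :=
  (List.range (PySem.List.pyGetD matrix 0 []).length).foldl (fun result (column : Nat) =>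
    result ++ [(List.range vector.length).foldl (fun value (row : Nat) =>
      PySem.Int.bxor value (PySem.Int.band (PySem.List.pyGetD vector (row : Int) 0)
        (PySem.List.pyGetD (PySem.List.pyGetD matrix (row : Int) []) (column : Int) 0))) 0]) []

def generate_linear_code (generator_matrix : List (List Int)) : List (List Int) × List (List Int) :=
  let messages := prod01 generator_matrix.length
  (messages,
   PySem.List.sorted (PySem.Set.ofList (messages.map (fun m => gf2_vector_matrix_mul m generator_matrix)))
     (fun x => x) false)

-- min/max of the nonzero-index list; the .getD 0 is unreachable under Pre_ (every row contains a 1)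
def row_span (row : List Int) : Int × Int :=
  let nonzero := ((PySem.List.enumerate row).filter (fun p => p.2 == 1)).map (fun p => p.1)
  ((PySem.List.min? nonzero (fun x => x)).getD 0, (PySem.List.max? nonzero (fun x => x)).getD 0)

def active_rows_after_position (generator_matrix : List (List Int)) (level : Int) : List Int :=
  (PySem.List.enumerate generator_matrix).foldl (fun active p =>
    let se := row_span p.2
    if se.1 < level ∧ level ≤ se.2 then active ++ [p.1] else active) []

def build_trellis_by_generator_matrix (generator_matrix : List (List Int)) :
    List (List String) × (List (List (String × String × Int))) :=
  let mc := generate_linear_code generator_matrix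
  let messages := mc.1
  let codewords := mc.2
  let n := (PySem.List.pyGetD generator_matrix 0 []).length
  -- the level loop, building states_by_level and state_maps together
  let acc := (List.range (n + 1)).foldl
    (fun (acc : List (List String) × List (List Int × PySem.Dict (List Int) String)) (level : Nat) =>
      let active := active_rows_after_position generator_matrix (level : Int)
      let states := PySem.List.sorted
        (PySem.Set.ofList (messages.map (fun m => active.map (fun r => PySem.List.pyGetD m r 0))))
        (fun x => x) false
      let state_map := (PySem.List.enumerate states).foldl
        (fun d p => d.insert p.2 (pvName level p.1)) PySem.Dict.empty
      (acc.1 ++ [states.map (fun st => state_map.getD st "" ++ "=" ++ pvTupleRepr st)],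
       acc.2 ++ [(active, state_map)])) ([], [])
  -- the edge loop (dict lookups always hit under Pre_, so the getD defaults are unreachable)
  let edges := (List.range n).foldl (fun es (level : Nat) =>
    let src := PySem.List.pyGetD acc.2 (level : Int) ([], PySem.Dict.empty)
    let tgt := PySem.List.pyGetD acc.2 ((level : Int) + 1) ([], PySem.Dict.empty)
    let edge_set := (messages.zip codewords).foldl
      (fun (s : PySem.Set (String × String × Int)) mc =>
        s.add (src.2.getD (src.1.map (fun r => PySem.List.pyGetD mc.1 r 0)) "",
               tgt.2.getD (tgt.1.map (fun r => PySem.List.pyGetD mc.1 r 0)) "",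
               PySem.List.pyGetD mc.2 (level : Int) 0)) PySem.Set.empty
    es ++ [pvEdgeSort edge_set]) []
  (acc.1, edges)

-- ===== PORT B =====

-- acc = [a ^ (bit & row[col]) for col, a in enumerate(acc)], folded over zip(message, matrix)
def pv_codeword (message : List Int) (matrix : List (List Int)) (n : Nat) : List Int :=
  (message.zip matrix).foldl (fun acc br =>
    (PySem.List.enumerate acc).map (fun p =>
      PySem.Int.bxor p.2 (PySem.Int.band br.1 (PySem.List.pyGetD br.2 p.1 0))))
    (List.replicate n 0)

def pv_actives (spans : List (Int × Int)) (n : Nat) : List (List Int) :=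
  (List.range (n + 1)).map (fun (level : Nat) =>
    ((PySem.List.enumerate spans).filter
      (fun p => decide (p.2.1 < (level : Int)) && decide ((level : Int) ≤ p.2.2))).map (fun p => p.1))

-- idx = 0; for row in active: idx = 2*idx + message[row]; then f"S{level}_{idx}"
def pv_name (level : Nat) (message : List Int) (active : List Int) : String :=
  pvName level (active.foldl (fun idx r => 2 * idx + PySem.List.pyGetD message r 0) 0)

def build_trellis_by_generator_matrix_alt (generator_matrix : List (List Int)) :
    List (List String) × (List (List (String × String × Int))) :=
  let k := generator_matrix.length
  let n := (PySem.List.pyGetD generator_matrix 0 []).length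
  let spans := generator_matrix.map row_span
  let actives := pv_actives spans n
  let states_by_level := (List.range (n + 1)).map (fun (level : Nat) =>
    (PySem.List.enumerate (prod01 (PySem.List.pyGetD actives (level : Int) []).length)).map
      (fun p => pvName level p.1 ++ "=" ++ pvTupleRepr p.2))
  let messages := prod01 k
  let codewords := PySem.List.sorted
    (PySem.Set.ofList (messages.map (fun m => pv_codeword m generator_matrix n))) (fun x => x) false
  -- one pass over the (message, codeword) pairs; 'for level in range(n): edge_sets[level].add(…)'
  -- updates each of the n sets once, in index order: that inner loop is the mapIdx
  let edge_sets := (messages.zip codewords).foldl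
    (fun (sets : List (PySem.Set (String × String × Int))) mc =>
      sets.mapIdx (fun (level : Nat) s =>
        s.add (pv_name level mc.1 (PySem.List.pyGetD actives (level : Int) []),
               pv_name (level + 1) mc.1 (PySem.List.pyGetD actives ((level : Int) + 1) []),
               PySem.List.pyGetD mc.2 (level : Int) 0)))
    (List.replicate n PySem.Set.empty)
  (states_by_level, edge_sets.map pvEdgeSort)

-- ===== PRECONDITION & SPEC =====
-- Pre_ excludes exactly the inputs where A raises: an empty matrix (IndexError on generator_matrix[0]),
-- a row shorter than the first row (IndexError in the GF(2) multiplication), and a row without a 1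
-- (ValueError: min of an empty sequence in row_span).
def Pre_build_trellis_by_generator_matrix (generator_matrix : List (List Int)) : Prop :=
  generator_matrix ≠ [] ∧
  ∀ row ∈ generator_matrix,
    (PySem.List.pyGetD generator_matrix 0 []).length ≤ row.length ∧ (1 : Int) ∈ row
instance (generator_matrix : List (List Int)) : Decidable (Pre_build_trellis_by_generator_matrix generator_matrix) := by
  unfold Pre_build_trellis_by_generator_matrix; infer_instance

def pvWitness_build_trellis_by_generator_matrix : List (List Int) := [[1, 1, 0], [0, 1, 1]]

def Spec_build_trellis_by_generator_matrix (generator_matrix : List (List Int)) (out : List (List String) × (List (List (String × String × Int)))) : Prop := out = build_trellis_by_generator_matrix_alt generator_matrix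
instance (generator_matrix : List (List Int)) (out : List (List String) × (List (List (String × String × Int)))) : Decidable (Spec_build_trellis_by_generator_matrix generator_matrix out) := by unfold Spec_build_trellis_by_generator_matrix; infer_instance

-- ===== CLAIM (what is proved, stated in full; the proofs are below) =====
def Claim_equal_build_trellis_by_generator_matrix : Prop := ∀ (generator_matrix : List (List Int)), Dom_build_trellis_by_generator_matrix generator_matrix → Pre_build_trellis_by_generator_matrix generator_matrix → Spec_build_trellis_by_generator_matrix generator_matrix (build_trellis_by_generator_matrix generator_matrix)

-- ===== LEMMAS AND PROOFS =====

-- the projection of a message onto the active rows, as both ports write it inline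
def pvProj (m : List Int) (active : List Int) : List Int :=
  active.map (fun r => PySem.List.pyGetD m r 0)

def pvBin (t : List Int) : Int := t.foldl (fun a x => 2 * a + x) 0

theorem pv_binfold_shift (t : List Int) (c : Int) :
    t.foldl (fun a x => 2 * a + x) c = c * 2 ^ t.length + pvBin t := by
  induction t generalizing c with
  | nil => simp [pvBin]
  | cons x t ih =>
    simp only [pvBin, List.foldl_cons, List.length_cons]
    rw [ih (2 * c + x), ih (2 * 0 + x)]
    ring

theorem pvBin_cons (b : Int) (t : List Int) : pvBin (b :: t) = b * 2 ^ t.length + pvBin t := by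
  have h : pvBin (b :: t) = t.foldl (fun a x => 2 * a + x) (2 * 0 + b) := rfl
  rw [h, pv_binfold_shift]
  ring

theorem pv_length_prod01 (m : Nat) : (prod01 m).length = 2 ^ m := by
  induction m with
  | zero => simp [prod01]
  | succ k ih => simp [prod01, ih]; ring

theorem pv_mem_prod01 (m : Nat) (x : List Int) :
    x ∈ prod01 m ↔ x.length = m ∧ ∀ b ∈ x, b = 0 ∨ b = 1 := by
  induction m generalizing x with
  | zero => simp [prod01, List.length_eq_zero_iff]; rintro rfl; simp
  | succ k ih =>
    cases x with
    | nil => simp [prod01]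
    | cons b t =>
      simp [prod01, ih]
      constructor
      · rintro (⟨⟨hl, hb⟩, rfl⟩ | ⟨⟨hl, hb⟩, rfl⟩) <;> exact ⟨hl, by norm_num, hb⟩
      · rintro ⟨hl, hb, ht⟩
        rcases hb with rfl | rfl
        · exact Or.inl ⟨⟨hl, ht⟩, rfl⟩
        · exact Or.inr ⟨⟨hl, ht⟩, rfl⟩

theorem pv_nodup_prod01 (m : Nat) : (prod01 m).Nodup := by
  induction m with
  | zero => simp [prod01]
  | succ k ih =>
    refine (List.nodup_append).2 ⟨?_, ?_, ?_⟩
    · exact ih.map (fun a b h => by simpa using h)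
    · exact ih.map (fun a b h => by simpa using h)
    · intro x hx y hy
      simp only [List.mem_map] at hx hy
      rcases hx with ⟨s, _, rfl⟩; rcases hy with ⟨u, _, rfl⟩
      simp

theorem pv_pairwise_prod01 (m : Nat) : (prod01 m).Pairwise (· < ·) := by
  induction m with
  | zero => simp [prod01]
  | succ k ih =>
    refine (List.pairwise_append).2 ⟨?_, ?_, ?_⟩
    · exact (List.pairwise_map).2 (ih.imp (fun h => by
        exact (List.cons_lt_cons_iff).2 (Or.inr ⟨rfl, h⟩)))
    · exact (List.pairwise_map).2 (ih.imp (fun h => by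
        exact (List.cons_lt_cons_iff).2 (Or.inr ⟨rfl, h⟩)))
    · intro x hx y hy
      simp only [List.mem_map] at hx hy
      rcases hx with ⟨s, _, rfl⟩; rcases hy with ⟨u, _, rfl⟩
      exact (List.cons_lt_cons_iff).2 (Or.inl (by norm_num))

theorem pv_bin_prod01 (m : Nat) (i : Nat) (h : i < (prod01 m).length) :
    pvBin ((prod01 m)[i]) = (i : Int) := by
  induction m generalizing i with
  | zero => simp [prod01] at h ⊢; subst h; simp [pvBin]
  | succ k ih =>
    have hlen : (prod01 k).length = 2 ^ k := pv_length_prod01 k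
    by_cases hi : i < ((prod01 k).map (fun t => 0 :: t)).length
    · simp only [prod01] at h ⊢
      rw [List.getElem_append_left hi]
      have hi' : i < (prod01 k).length := by simpa using hi
      rw [List.getElem_map]
      rw [pvBin_cons, ih i hi']
      ring
    · have hi' : i - ((prod01 k).map (fun t => 0 :: t)).length < ((prod01 k).map (fun t => 1 :: t)).length := by
        simp only [List.length_map] at *
        simp [prod01] at h
        omega
      simp only [prod01] at h ⊢
      rw [List.getElem_append_right (by omega)]
      rw [List.getElem_map]
      set j := i - ((prod01 k).map (fun t => 0 :: t)).length with hj
      have hj' : j < (prod01 k).length := by simpa using hi'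
      have hmem : (prod01 k)[j] ∈ prod01 k := List.getElem_mem _
      have hlj : ((prod01 k)[j]).length = k := ((pv_mem_prod01 k _).1 hmem).1
      rw [pvBin_cons, hlj, ih j hj']
      have hij : i = 2 ^ k + j := by
        obtain ⟨P, hP⟩ : ∃ P, (prod01 k).length = P := ⟨_, rfl⟩
        simp only [List.length_map, hP] at hj hi
        omega
      rw [hij]
      push_cast
      ring

theorem pv_states_eq (k : Nat) (active : List Int)
    (hb : ∀ r ∈ active, 0 ≤ r ∧ r < (k : Int)) (hnd : active.Nodup) :
    PySem.List.sorted (PySem.Set.ofList ((prod01 k).map (fun m => pvProj m active)))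
      (fun x => x) false = prod01 active.length := by
  have hperm : (prod01 active.length).Perm
      (PySem.Set.ofList ((prod01 k).map (fun m => pvProj m active))) := by
    apply (List.perm_ext_iff_of_nodup (pv_nodup_prod01 _) (PySem.Set.nodup_ofList _)).2
    intro x
    rw [PySem.Set.mem_ofList, List.mem_map, pv_mem_prod01]
    constructor
    · rintro ⟨hl, hbits⟩
      refine ⟨(List.range k).map (fun (i : Nat) => if (i : Int) ∈ active then x.getD (active.idxOf (i : Int)) 0 else 0), ?_, ?_⟩
      · rw [pv_mem_prod01]
        refine ⟨by simp, ?_⟩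
        intro b hb2
        simp only [List.mem_map, List.mem_range] at hb2
        rcases hb2 with ⟨i, hi, rfl⟩
        split_ifs with hmem
        · by_cases hx : active.idxOf (i : Int) < x.length
          · rw [List.getD_eq_getElem x 0 hx]
            exact hbits _ (List.getElem_mem _)
          · rw [List.getD_eq_default _ _ (by omega)]; left; rfl
        · left; rfl
      · apply List.ext_getElem
        · simp [pvProj, hl]
        · intro p hp hq
          simp only [pvProj, List.getElem_map]
          have hap : active[p] ∈ active := List.getElem_mem _
          obtain ⟨h0, hk⟩ := hb _ hap
          rw [PySem.List.pyGetD_eq_getElem _ 0 h0 (by simpa using hk)]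
          have hlen : (active[p]).toNat < (List.range k).length := by
            simp; omega
          rw [List.getElem_map, List.getElem_range]
          have hcast : (((active[p]).toNat : Int)) = active[p] := Int.toNat_of_nonneg h0
          rw [if_pos (by rw [hcast]; exact hap)]
          have hidx : active.idxOf ((((active[p]).toNat : Nat) : Int)) = p := by
            rw [hcast]
            exact List.Nodup.idxOf_getElem hnd p (by simpa [pvProj] using hp)
          rw [hidx, List.getD_eq_getElem x 0 (by simpa using hq)]
    · rintro ⟨msg, hmsg, rfl⟩
      rw [pv_mem_prod01] at hmsg
      refine ⟨by simp [pvProj], ?_⟩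
      intro b hb2
      simp only [pvProj, List.mem_map] at hb2
      rcases hb2 with ⟨r, hr, rfl⟩
      obtain ⟨h0, hk⟩ := hb r hr
      rw [PySem.List.pyGetD_eq_getElem _ 0 h0 (by rw [hmsg.1]; exact hk)]
      exact hmsg.2 _ (List.getElem_mem _)
  convert PySem.List.sorted_eq_of_perm_of_pairwise_lt _ _ _ hperm (pv_pairwise_prod01 active.length) using 2

theorem pv_dict_getD (level : Nat) (states : List (List Int)) (hnd : states.Nodup)
    (i : Nat) (h : i < states.length) :
    ((PySem.List.enumerate states).foldl
      (fun d p => d.insert p.2 (pvName level p.1)) PySem.Dict.empty).getD states[i] ""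
      = pvName level (i : Int) := by
  have hfresh : ∀ p ∈ PySem.List.enumerate states,
      (PySem.Dict.empty : PySem.Dict (List Int) String).contains p.2 = false := by
    intro p _; simp [PySem.Dict.contains_empty]
  have hkeys : ((PySem.List.enumerate states).map (fun p => p.2)).Nodup := by
    rw [PySem.List.map_snd_enumerate]; exact hnd
  have hitems := PySem.Dict.items_foldl_insert_fresh (PySem.List.enumerate states)
    (fun p => p.2) (fun p => pvName level p.1) PySem.Dict.empty hfresh hkeys
  apply PySem.Dict.getD_of_mem_items
  · rw [hitems]
    have hmem : ((i : Int), states[i]) ∈ PySem.List.enumerate states := by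
      rw [PySem.List.mem_enumerate_iff]
      exact ⟨i, h, by simp⟩
    have : (states[i], pvName level (i : Int)) =
        (fun p : Int × List Int => (p.2, pvName level p.1)) ((i : Int), states[i]) := rfl
    rw [this]
    exact List.mem_append_right _ (List.mem_map_of_mem hmem)
  · exact PySem.Dict.nodup_keys_foldl_insert_key _ _ _ _ (by simp)

theorem pv_name_eq (k level : Nat) (active : List Int)
    (hb : ∀ r ∈ active, 0 ≤ r ∧ r < (k : Int)) (_hnd : active.Nodup)
    (msg : List Int) (hm : msg ∈ prod01 k) :
    ((PySem.List.enumerate (prod01 active.length)).foldl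
      (fun d p => d.insert p.2 (pvName level p.1)) PySem.Dict.empty).getD (pvProj msg active) ""
      = pv_name level msg active := by
  have hproj : pvProj msg active ∈ prod01 active.length := by
    rw [pv_mem_prod01]
    refine ⟨by simp [pvProj], ?_⟩
    intro b hb2
    simp only [pvProj, List.mem_map] at hb2
    rcases hb2 with ⟨r, hr, rfl⟩
    obtain ⟨h0, hk⟩ := hb r hr
    have hml : msg.length = k := ((pv_mem_prod01 k msg).1 hm).1
    rw [PySem.List.pyGetD_eq_getElem _ 0 h0 (by rw [hml]; exact hk)]
    exact ((pv_mem_prod01 k msg).1 hm).2 _ (List.getElem_mem _)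
  obtain ⟨i, hi, hgi⟩ := List.mem_iff_getElem.1 hproj
  rw [← hgi, pv_dict_getD level _ (pv_nodup_prod01 _) i hi]
  unfold pv_name
  have : active.foldl (fun idx r => 2 * idx + PySem.List.pyGetD msg r 0) 0
      = pvBin (pvProj msg active) := by
    rw [pvBin, pvProj, List.foldl_map]
  rw [this, ← hgi, pv_bin_prod01 _ _ hi]

theorem pv_enumerate_map {α β : Type} (xs : List α) (h : α → β) (s : Int) :
    PySem.List.enumerate (xs.map h) s = (PySem.List.enumerate xs s).map (fun p => (p.1, h p.2)) := by
  induction xs generalizing s with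
  | nil => simp [PySem.List.enumerate_nil]
  | cons x xs ih => simp [PySem.List.enumerate_cons, ih]

theorem pv_active_eq (gm : List (List Int)) (level : Int) :
    active_rows_after_position gm level
      = ((PySem.List.enumerate gm).filter
          (fun q => decide ((row_span q.2).1 < level) && decide (level ≤ (row_span q.2).2))).map
          (fun q => q.1) := by
  unfold active_rows_after_position
  rw [PySem.List.foldl_append_ite
    (p := fun q : Int × List Int => (row_span q.2).1 < level ∧ level ≤ (row_span q.2).2)
    (f := fun q : Int × List Int => q.1)]
  simp [Bool.decide_and]

theorem pv_active_facts (gm : List (List Int)) (level : Int) :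
    (∀ r ∈ active_rows_after_position gm level, 0 ≤ r ∧ r < (gm.length : Int)) ∧
    (active_rows_after_position gm level).Nodup := by
  rw [pv_active_eq]
  constructor
  · intro r hr
    simp only [List.mem_map, List.mem_filter] at hr
    rcases hr with ⟨q, ⟨hq, _⟩, rfl⟩
    rw [PySem.List.mem_enumerate_iff] at hq
    rcases hq with ⟨j, hj, rfl⟩
    simp
    omega
  · have h1 : ((PySem.List.enumerate gm).filter
        (fun q => decide ((row_span q.2).1 < level) && decide (level ≤ (row_span q.2).2))).Pairwise
        (fun p q => p.1 < q.1) :=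
      List.Pairwise.sublist (List.filter_sublist) (PySem.List.pairwise_lt_enumerate gm 0)
    exact List.Pairwise.imp (fun h => by omega) ((List.pairwise_map).2 h1)

theorem pv_actives_getD (gm : List (List Int)) (n level : Nat) (h : level < n + 1) :
    PySem.List.pyGetD (pv_actives (gm.map row_span) n) (level : Int) []
      = active_rows_after_position gm (level : Int) := by
  unfold pv_actives
  rw [PySem.List.pyGetD_natCast, PySem.List.getD_map_range _ _ _ _ h,
    pv_enumerate_map, List.filter_map, List.map_map, pv_active_eq]
  rfl

theorem pv_foldl_mapIdx_comm {α β : Type} (g : Nat → β → α → β) (ps : List α) (init : List β) :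
    ps.foldl (fun acc p => acc.mapIdx (fun i b => g i b p)) init
      = init.mapIdx (fun i b => ps.foldl (fun b p => g i b p) b) := by
  induction ps generalizing init with
  | nil =>
    simp only [List.foldl_nil]
    apply List.ext_getElem <;> simp [List.getElem_mapIdx]
  | cons p ps ih =>
    simp only [List.foldl_cons]
    rw [ih]
    apply List.ext_getElem <;> simp [List.getElem_mapIdx]

theorem pv_mapIdx_replicate {β γ : Type} (n : Nat) (a : β) (f : Nat → β → γ) :
    (List.replicate n a).mapIdx f = (List.range n).map (fun i => f i a) := by
  apply List.ext_getElem <;> simp [List.getElem_mapIdx]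

theorem pv_enum_map {α β : Type} (acc : List α) (g : Int × α → β) :
    (PySem.List.enumerate acc).map g = acc.mapIdx (fun i a => g ((i : Int), a)) := by
  apply List.ext_getElem
  · simp [PySem.List.length_enumerate]
  · intro i h1 h2
    have hi : i < acc.length := by simpa [PySem.List.length_enumerate] using h1
    simp [List.getElem_mapIdx, PySem.List.getElem_enumerate]

theorem pv_zipfold {α β γ : Type} (f : γ → α → β → γ) (dx : α) (dy : β) :
    ∀ (xs : List α) (ys : List β), xs.length = ys.length → ∀ (a : γ),
    (List.range xs.length).foldl
      (fun acc i => f acc (xs.getD i dx) (ys.getD i dy)) a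
      = (xs.zip ys).foldl (fun acc p => f acc p.1 p.2) a := by
  intro xs
  induction xs with
  | nil => intro ys h a; simp
  | cons x xs ih =>
    intro ys h a
    cases ys with
    | nil => simp at h
    | cons y ys =>
      simp only [List.length_cons] at h ⊢
      rw [List.range_succ_eq_map, List.foldl_cons, List.foldl_map]
      simp only [List.getD_cons_succ, List.getD_cons_zero, List.zip_cons_cons, List.foldl_cons]
      exact ih ys (by omega) (f a x y)

theorem pv_mul_eq (gm : List (List Int)) (msg : List Int) (h : msg.length = gm.length) :
    gf2_vector_matrix_mul msg gm = pv_codeword msg gm (PySem.List.pyGetD gm 0 []).length := by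
  unfold gf2_vector_matrix_mul pv_codeword
  rw [PySem.List.foldl_append_singleton_eq_map]
  simp only [pv_enum_map]
  rw [show (fun (acc : List Int) (br : Int × List Int) =>
        List.mapIdx (fun i a => PySem.Int.bxor a (PySem.Int.band br.1 (PySem.List.pyGetD br.2 (i : Int) 0))) acc)
      = (fun acc br => acc.mapIdx (fun i b =>
          (fun (i : Nat) (b : Int) (p : Int × List Int) =>
            PySem.Int.bxor b (PySem.Int.band p.1 (PySem.List.pyGetD p.2 (i : Int) 0))) i b br)) from rfl,
    pv_foldl_mapIdx_comm, pv_mapIdx_replicate]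
  simp only [List.nil_append]
  apply List.map_congr_left
  intro col _
  rw [← pv_zipfold (fun v a b => PySem.Int.bxor v (PySem.Int.band a (PySem.List.pyGetD b (col : Int) 0))) 0 [] msg gm h]
  apply PySem.List.foldl_congr_mem
  intro acc row hrow
  simp [PySem.List.pyGetD_natCast]

-- ===== VERDICT (by name: the statement is the Claim_ definition above) =====
theorem build_trellis_by_generator_matrix_spec : Claim_equal_build_trellis_by_generator_matrix := by
  intro gm hdom hpre
  unfold Spec_build_trellis_by_generator_matrix
  unfold build_trellis_by_generator_matrix build_trellis_by_generator_matrix_alt generate_linear_code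
  simp only []
  rw [PySem.List.foldl_prod_mk
    (f := fun (l : List (List String)) (level : Nat) =>
      l ++ [List.map (fun st =>
        (List.foldl (fun d p => d.insert p.2 (pvName level p.1)) PySem.Dict.empty
          (PySem.List.enumerate
            (PySem.List.sorted (PySem.Set.ofList
              (List.map (fun m => List.map (fun r => PySem.List.pyGetD m r 0)
                (active_rows_after_position gm ↑level)) (prod01 gm.length))) fun x => x))).getD st ""
          ++ "=" ++ pvTupleRepr st)
        (PySem.List.sorted (PySem.Set.ofList
          (List.map (fun m => List.map (fun r => PySem.List.pyGetD m r 0)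
            (active_rows_after_position gm ↑level)) (prod01 gm.length))) fun x => x)])
    (g := fun (l : List (List Int × PySem.Dict (List Int) String)) (level : Nat) =>
      l ++ [(active_rows_after_position gm ↑level,
        List.foldl (fun d p => d.insert p.2 (pvName level p.1)) PySem.Dict.empty
          (PySem.List.enumerate
            (PySem.List.sorted (PySem.Set.ofList
              (List.map (fun m => List.map (fun r => PySem.List.pyGetD m r 0)
                (active_rows_after_position gm ↑level)) (prod01 gm.length))) fun x => x)))])]
  simp only [PySem.List.foldl_append_singleton_eq_map, List.nil_append]
  -- codewords agree
  have hcw : List.map (fun m => pv_codeword m gm (PySem.List.pyGetD gm 0 []).length) (prod01 gm.length)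
      = List.map (fun m => gf2_vector_matrix_mul m gm) (prod01 gm.length) := by
    apply List.map_congr_left
    intro m hm
    exact (pv_mul_eq gm m ((pv_mem_prod01 _ m).1 hm).1).symm
  rw [hcw]
  rw [Prod.mk.injEq]
  constructor
  · -- states_by_level
    apply List.map_congr_left
    intro level hlev
    simp only [List.mem_range] at hlev
    obtain ⟨hbnd, hnd⟩ := pv_active_facts gm (level : Int)
    have hst := pv_states_eq gm.length (active_rows_after_position gm (level : Int)) hbnd hnd
    simp only [pvProj] at hst
    rw [hst, pv_actives_getD gm _ level hlev]
    apply List.ext_getElem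
    · simp [PySem.List.length_enumerate]
    · intro i h1 h2
      have hi : i < (prod01 (active_rows_after_position gm (level : Int)).length).length := by
        simpa using h1
      simp only [List.getElem_map, PySem.List.getElem_enumerate]
      rw [pv_dict_getD level _ (pv_nodup_prod01 _) i hi]
      norm_num
  · -- edges
    rw [show (fun (sets : List (PySem.Set (String × String × Int))) (mc : List Int × List Int) =>
          List.mapIdx (fun level s =>
            s.add (pv_name level mc.1 (PySem.List.pyGetD (pv_actives (List.map row_span gm) (PySem.List.pyGetD gm 0 []).length) (level : Int) []),
                   pv_name (level + 1) mc.1 (PySem.List.pyGetD (pv_actives (List.map row_span gm) (PySem.List.pyGetD gm 0 []).length) ((level : Int) + 1) []),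
                   PySem.List.pyGetD mc.2 (level : Int) 0)) sets)
        = (fun sets mc => sets.mapIdx (fun i b =>
            (fun (i : Nat) (b : PySem.Set (String × String × Int)) (p : List Int × List Int) =>
              b.add (pv_name i p.1 (PySem.List.pyGetD (pv_actives (List.map row_span gm) (PySem.List.pyGetD gm 0 []).length) (i : Int) []),
                     pv_name (i + 1) p.1 (PySem.List.pyGetD (pv_actives (List.map row_span gm) (PySem.List.pyGetD gm 0 []).length) ((i : Int) + 1) []),
                     PySem.List.pyGetD p.2 (i : Int) 0)) i b mc)) from rfl,
      pv_foldl_mapIdx_comm, pv_mapIdx_replicate, List.map_map]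
    apply List.map_congr_left
    intro level hlev
    simp only [List.mem_range] at hlev
    simp only [Function.comp_apply]
    congr 1
    apply PySem.List.foldl_congr_mem
    intro s mc hmc
    have hm1 : mc.1 ∈ prod01 gm.length := by
      exact (List.of_mem_zip (a := mc.1) (b := mc.2) (by simpa using hmc)).1
    -- resolve the state_maps lookups
    rw [PySem.List.pyGetD_natCast, PySem.List.getD_map_range _ _ _ _ (by omega),
      show ((level : Int) + 1) = (((level + 1 : Nat)) : Int) by push_cast; ring,
      PySem.List.pyGetD_natCast, PySem.List.getD_map_range _ _ _ _ (by omega)]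
    obtain ⟨hbnd, hnd⟩ := pv_active_facts gm (level : Int)
    obtain ⟨hbnd', hnd'⟩ := pv_active_facts gm ((level + 1 : Nat) : Int)
    have hst := pv_states_eq gm.length (active_rows_after_position gm (level : Int)) hbnd hnd
    have hst' := pv_states_eq gm.length (active_rows_after_position gm ((level + 1 : Nat) : Int)) hbnd' hnd'
    simp only [pvProj] at hst hst'
    rw [hst, hst']
    have hname := pv_name_eq gm.length level _ hbnd hnd mc.1 hm1
    have hname' := pv_name_eq gm.length (level + 1) _ hbnd' hnd' mc.1 hm1
    simp only [pvProj] at hname hname'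
    rw [hname, hname', pv_actives_getD gm _ level (by omega),
      pv_actives_getD gm _ (level + 1) (by omega)]
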